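-- pv_equiv track=rewrite | github.com/YukkuriC/django_ai_arena | external/cron.py | expand_markers
-- ===== SOURCE A (Python) =====
-- def expand_markers(targets):
--     """
--     将区间起点表示展开为按小时的列表
--     """
--     # 输入合法性检查
--     targets = {
--         k: v
--         for (k, v) in targets if isinstance(k, int) and 0 <= k < 24
--         and isinstance(v, int) and 0 <= v <= 60
--     }
--     if not targets:
--         return [0] * 24
--
--     # 展开为列表
--     first_time = None
--     last_time = last_freq = None
--     mapper = [0] * 24
--
--     def helper(t1, t2, f):
--         if t2 <= t1:
--             t2 += 24
--         for t in range(t1, t2):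
--             mapper[t % 24] = f
--
--     for time, freq in sorted(targets.items()):
--         if first_time is None:
--             first_time = time
--         if last_time != None:
--             helper(last_time, time, last_freq)
--         last_time, last_freq = time, freq
--     helper(last_time, first_time, last_freq)
--
--     return mapper
-- ===== SOURCE B (Python) =====
-- def expand_markers(targets):
--     """
--     将区间起点表示展开为按小时的列表
--     """
--     # same validity filtering as the original
--     valid = {
--         k: v
--         for (k, v) in targets if isinstance(k, int) and 0 <= k < 24
--         and isinstance(v, int) and 0 <= v <= 60
--     }
--     if not valid:
--         return [0] * 24
--
--     items = sorted(valid.items())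
--
--     def freq_at(h):
--         # frequency of the latest marker at or before hour h,
--         # wrapping around to the last marker of the day
--         best = items[-1][1]
--         for t, f in items:
--             if t <= h:
--                 best = f
--         return best
--
--     return [freq_at(h) for h in range(24)]
-- ===== Notes on version B (the rewrite author's own statement) =====
-- stated objective: alternative
-- what changed: Replaces the interval-expansion pass (mutating helper that writes each segment [t_i, t_{i+1}) into the shared mapper, plus a final wrap-around segment) with a direct per-hour lookup: for each hour h the frequency of the latest marker at or before h is found by a scan of the sorted markers, defaulting to the last marker when h precedes the first.
import Mathlib
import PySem

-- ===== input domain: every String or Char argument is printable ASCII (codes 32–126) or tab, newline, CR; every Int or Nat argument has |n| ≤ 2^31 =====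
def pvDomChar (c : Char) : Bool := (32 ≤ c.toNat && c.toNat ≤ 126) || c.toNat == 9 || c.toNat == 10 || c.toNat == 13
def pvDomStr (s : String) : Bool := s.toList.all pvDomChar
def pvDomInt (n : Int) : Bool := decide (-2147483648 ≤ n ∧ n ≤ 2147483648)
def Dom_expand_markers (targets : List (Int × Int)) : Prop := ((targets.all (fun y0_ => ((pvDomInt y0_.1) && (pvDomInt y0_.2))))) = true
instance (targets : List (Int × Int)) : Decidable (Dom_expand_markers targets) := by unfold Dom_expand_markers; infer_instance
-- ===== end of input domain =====

-- B replaces A's mutating interval-expansion (write each segment, then a wrap-around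
-- segment) with a per-hour lookup of the latest marker at or before each hour
-- (alternative decomposition; same results, similar cost).

-- ===== PORT A =====
-- the dict comprehension filtering valid (hour, freq) pairs (shared verbatim by both Pythons)
def emFilter (targets : List (Int × Int)) : PySem.Dict Int Int :=
  targets.foldl
    (fun d p => if 0 ≤ p.1 ∧ p.1 < 24 ∧ 0 ≤ p.2 ∧ p.2 ≤ 60 then d.insert p.1 p.2 else d)
    PySem.Dict.empty

-- A's nested 'helper(t1, t2, f)': extend t2 by 24 on wrap, then write f at every t % 24
def emHelper (t1 t2 f : Int) (m : List Int) : List Int :=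
  let t2' := if t2 ≤ t1 then t2 + 24 else t2
  (PySem.List.pyRange t1 t2' 1).foldl
    (fun m t => PySem.List.pySetD m (PySem.Int.mod t 24) f) m

def expand_markers (targets : List (Int × Int)) : List Int :=
  let d := emFilter targets
  if d.items = [] then List.replicate 24 0
  else
    let its := PySem.List.sorted2 d.items (fun p => p.1) (fun p => p.2)
    let st := its.foldl
      (fun (st : Option Int × Option Int × Option Int × List Int) p =>
        let ft := match st.1 with | none => some p.1 | some t => some t
        let m := match st.2.1, st.2.2.1 with
          | some lt', some lf' => emHelper lt' p.1 lf' st.2.2.2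
          | _, _ => st.2.2.2
        (ft, some p.1, some p.2, m))
      (none, none, none, List.replicate 24 0)
    match st with
    | (some ft, some lt', some lf', m) => emHelper lt' ft lf' m
    | (_, _, _, m) => m

-- ===== PORT B =====
def expand_markers_alt (targets : List (Int × Int)) : List Int :=
  let d := emFilter targets
  if d.items = [] then List.replicate 24 0
  else
    let its := PySem.List.sorted2 d.items (fun p => p.1) (fun p => p.2)
    (PySem.List.pyRange 0 24 1).map (fun h =>
      its.foldl (fun best p => if p.1 ≤ h then p.2 else best)
        (((PySem.List.pyGet? its (-1)).getD (0, 0)).2))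

-- ===== PRECONDITION & SPEC =====
def Spec_expand_markers (targets : List (Int × Int)) (out : List Int) : Prop := out = expand_markers_alt targets
instance (targets : List (Int × Int)) (out : List Int) : Decidable (Spec_expand_markers targets out) := by unfold Spec_expand_markers; infer_instance

-- ===== CLAIM (what is proved, stated in full; the proofs are below) =====
def Claim_equal_expand_markers : Prop := ∀ (targets : List (Int × Int)), Dom_expand_markers targets → Spec_expand_markers targets (expand_markers targets)

-- ===== LEMMAS AND PROOFS =====

-- B's per-hour scan: the value of the last pair (t, f) of l with t ≤ h, else c
def emLook (l : List (Int × Int)) (h c : Int) : Int :=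
  l.foldl (fun best p => if p.1 ≤ h then p.2 else best) c

-- the second component of the last pair of l, else c
def emLast (l : List (Int × Int)) (c : Int) : Int :=
  match l.getLast? with | some p => p.2 | none => c

theorem emLook_gt (l : List (Int × Int)) (h c : Int) (hg : ∀ p ∈ l, h < p.1) :
    emLook l h c = c := by
  induction l with
  | nil => rfl
  | cons p tl ih =>
    have hp := hg p (by simp)
    simp only [emLook, List.foldl_cons, if_neg (by omega : ¬ p.1 ≤ h)]
    exact ih (fun q hq => hg q (by simp [hq]))

theorem emLook_cons (p : Int × Int) (tl : List (Int × Int)) (h c : Int) :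
    emLook (p :: tl) h c = if p.1 ≤ h then emLook tl h p.2 else emLook tl h c := by
  simp only [emLook, List.foldl_cons]
  split_ifs <;> rfl

theorem emLast_cons (p : Int × Int) (tl : List (Int × Int)) (c : Int) :
    emLast (p :: tl) c = emLast tl p.2 := by
  unfold emLast
  cases tl with
  | nil => rfl
  | cons q tl =>
    rw [List.getLast?_cons_cons]
    rcases hx : (q :: tl).getLast? with _ | x
    · simp [List.getLast?_eq_none_iff] at hx
    · rfl

theorem emGetNegOne (l : List (Int × Int)) (p : Int × Int) :
    ((PySem.List.pyGet? (p :: l) (-1)).getD (0, 0)).2 = emLast l p.2 := by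
  induction l generalizing p with
  | nil => rfl
  | cons q tl ih =>
    have h1 : PySem.List.pyGet? (p :: q :: tl) (-1) = PySem.List.pyGet? (q :: tl) (-1) := by
      simp [PySem.List.pyGet?, PySem.List.pyIdx?]
      congr 1
    rw [h1, ih, emLast_cons]

theorem length_foldl_pySetD (l : List Int) (f : Int) :
    ∀ m : List Int,
      (l.foldl (fun m t => PySem.List.pySetD m (PySem.Int.mod t 24) f) m).length = m.length := by
  induction l with
  | nil => intro m; rfl
  | cons t tl ih =>
    intro m
    rw [List.foldl_cons, ih]
    exact PySem.List.length_pySetD m _ f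

theorem length_emHelper (t1 t2 f : Int) (m : List Int) :
    (emHelper t1 t2 f m).length = m.length := by
  unfold emHelper
  exact length_foldl_pySetD _ f m

-- writing f at t % 24 over range(a, b) : hour h receives f iff some t ∈ [a, b) has t % 24 = h,
-- i.e. iff the first such t, a + (h - a) % 24, is below b
theorem emSetRange_getD (n : Nat) :
    ∀ (a b f h : Int) (m : List Int), m.length = 24 → 0 ≤ h → h < 24 → (b - a).toNat = n →
    ((PySem.List.pyRange a b 1).foldl
        (fun m t => PySem.List.pySetD m (PySem.Int.mod t 24) f) m).getD h.toNat 0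
      = if a + (h - a) % 24 < b then f else m.getD h.toNat 0 := by
  induction n with
  | zero =>
    intro a b f h m hm hh1 hh2 hn
    have hba : b ≤ a := by omega
    rw [PySem.List.pyRange_one_eq_nil hba, List.foldl_nil, if_neg (by omega)]
  | succ n ih =>
    intro a b f h m hm hh1 hh2 hn
    have hab : a < b := by omega
    rw [PySem.List.pyRange_one_cons hab, List.foldl_cons]
    have hmod : PySem.Int.mod a 24 = a % 24 := PySem.Int.mod_eq_emod_of_pos (by omega)
    have hset : PySem.List.pySetD m (PySem.Int.mod a 24) f = m.set (a % 24).toNat f := by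
      rw [hmod]; exact PySem.List.pySetD_of_nonneg m f (by omega)
    rw [hset]
    rw [ih (a + 1) b f h _ (by simp [hm]) hh1 hh2 (by omega)]
    by_cases hc : (h - a) % 24 = 0
    · have hidx : (a % 24).toNat = h.toNat := by omega
      have hget : (m.set (a % 24).toNat f).getD h.toNat 0 = f := by
        rw [← hidx]
        have hlt : (a % 24).toNat < m.length := by omega
        simp [List.getD_eq_getElem?_getD, List.getElem?_set_self', List.getElem?_eq_getElem hlt]
      have h23 : (h - (a + 1)) % 24 = 23 := by omega
      rw [h23, hget, if_pos (show a + (h - a) % 24 < b by omega)]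
      split_ifs <;> rfl
    · have hidx : (a % 24).toNat ≠ h.toNat := by omega
      have hget : (m.set (a % 24).toNat f).getD h.toNat 0 = m.getD h.toNat 0 := by
        simp [List.getD_eq_getElem?_getD, List.getElem?_set_ne hidx]
      have hiff : (a + 1 + (h - (a + 1)) % 24 < b) ↔ (a + (h - a) % 24 < b) := by omega
      rw [hget, if_congr hiff rfl rfl]

theorem emHelper_getD (t1 t2 f h : Int) (m : List Int) (hm : m.length = 24)
    (h1 : 0 ≤ t1) (h2 : t1 < 24) (h3 : 0 ≤ t2) (h4 : t2 < 24)
    (hh1 : 0 ≤ h) (hh2 : h < 24) :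
    (emHelper t1 t2 f m).getD h.toNat 0
      = if (t1 ≤ h ∧ (h < t2 ∨ t2 ≤ t1)) ∨ (t2 ≤ t1 ∧ h < t2) then f
        else m.getD h.toNat 0 := by
  unfold emHelper
  by_cases ht : t2 ≤ t1
  · simp only [if_pos ht]
    rw [emSetRange_getD ((t2 + 24 - t1).toNat) t1 (t2 + 24) f h m hm hh1 hh2 rfl]
    have hiff : (t1 + (h - t1) % 24 < t2 + 24) ↔
        ((t1 ≤ h ∧ (h < t2 ∨ t2 ≤ t1)) ∨ (t2 ≤ t1 ∧ h < t2)) := by omega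
    rw [if_congr hiff rfl rfl]
  · simp only [if_neg ht]
    rw [emSetRange_getD ((t2 - t1).toNat) t1 t2 f h m hm hh1 hh2 rfl]
    have hiff : (t1 + (h - t1) % 24 < t2) ↔
        ((t1 ≤ h ∧ (h < t2 ∨ t2 ≤ t1)) ∨ (t2 ≤ t1 ∧ h < t2)) := by omega
    rw [if_congr hiff rfl rfl]

-- A's loop over the markers after the first, with the mapper threaded through,
-- followed by the final wrap-around helper call
def emLoop (lt lf : Int) (m : List Int) (tl : List (Int × Int)) : Int × Int × List Int :=
  tl.foldl (fun st p => (p.1, p.2, emHelper st.1 p.1 st.2.1 st.2.2)) (lt, lf, m)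

def emFinish (ft lt lf : Int) (m : List Int) (tl : List (Int × Int)) : List Int :=
  let s := emLoop lt lf m tl
  emHelper s.1 ft s.2.1 s.2.2

theorem emFinish_getD (tl : List (Int × Int)) :
    ∀ (ft lt lf : Int) (m : List Int) (h : Int),
      tl.Pairwise (fun p q => p.1 < q.1) →
      (∀ p ∈ tl, lt < p.1 ∧ p.1 < 24) →
      0 ≤ ft → ft ≤ lt → lt < 24 → m.length = 24 → 0 ≤ h → h < 24 →
      (emFinish ft lt lf m tl).getD h.toNat 0
        = if lt ≤ h then emLook tl h lf
          else if h < ft then emLast tl lf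
          else m.getD h.toNat 0 := by
  induction tl with
  | nil =>
    intro ft lt lf m h _ _ hft hfl hlt hm hh1 hh2
    show (emHelper lt ft lf m).getD h.toNat 0 = _
    rw [emHelper_getD lt ft lf h m hm (by omega) hlt hft (by omega) hh1 hh2]
    simp only [emLook, List.foldl_nil, emLast]
    split_ifs <;> first | rfl | omega
  | cons p tl ih =>
    intro ft lt lf m h hpw hks hft hfl hlt hm hh1 hh2
    have hp := hks p (by simp)
    have hstep : emFinish ft lt lf m (p :: tl) = emFinish ft p.1 p.2 (emHelper lt p.1 lf m) tl := by
      simp [emFinish, emLoop]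
    rw [hstep]
    rw [ih ft p.1 p.2 _ h (List.Pairwise.sublist (List.sublist_cons_self p tl) hpw)
      (fun q hq => ⟨(List.pairwise_cons.mp hpw).1 q hq, (hks q (by simp [hq])).2⟩)
      hft (by omega) hp.2 (by rw [length_emHelper]; exact hm) hh1 hh2]
    rw [emHelper_getD lt p.1 lf h m hm (by omega) hlt (by omega) hp.2 hh1 hh2]
    rw [emLook_cons, emLast_cons]
    have hgt : ∀ q ∈ tl, p.1 < q.1 := (List.pairwise_cons.mp hpw).1
    by_cases hc1 : p.1 ≤ h
    · have hlth : lt ≤ h := by omega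
      simp only [if_pos hc1, if_pos hlth]
    · rw [if_neg hc1]
      by_cases hc2 : lt ≤ h
      · rw [if_neg (show ¬ h < ft by omega),
            if_pos (show lt ≤ h ∧ (h < p.1 ∨ p.1 ≤ lt) ∨ p.1 ≤ lt ∧ h < p.1 by omega),
            if_pos hc2, if_neg hc1,
            emLook_gt tl h lf (fun q hq => by have := hgt q hq; omega)]
      · rw [if_neg hc2]
        by_cases hc3 : h < ft
        · rw [if_pos hc3, if_pos hc3]
        · rw [if_neg hc3, if_neg hc3,
              if_neg (show ¬ (lt ≤ h ∧ (h < p.1 ∨ p.1 ≤ lt) ∨ p.1 ≤ lt ∧ h < p.1) by omega)]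

-- A's Option-state fold, once the first marker has been consumed, is emLoop
theorem emFoldA (tl : List (Int × Int)) :
    ∀ (ft lt lf : Int) (m : List Int),
      tl.foldl
        (fun (st : Option Int × Option Int × Option Int × List Int) p =>
          let ftv := match st.1 with | none => some p.1 | some t => some t
          let mv := match st.2.1, st.2.2.1 with
            | some lt', some lf' => emHelper lt' p.1 lf' st.2.2.2
            | _, _ => st.2.2.2
          (ftv, some p.1, some p.2, mv))
        (some ft, some lt, some lf, m)
      = (some ft, some (emLoop lt lf m tl).1, some (emLoop lt lf m tl).2.1, (emLoop lt lf m tl).2.2) := by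
  induction tl with
  | nil => intro ft lt lf m; rfl
  | cons p tl ih =>
    intro ft lt lf m
    rw [List.foldl_cons]
    show tl.foldl _ (some ft, some p.1, some p.2, emHelper lt p.1 lf m) = _
    rw [ih ft p.1 p.2 (emHelper lt p.1 lf m)]
    simp [emLoop]

theorem length_emLoop (tl : List (Int × Int)) :
    ∀ (lt lf : Int) (m : List Int), (emLoop lt lf m tl).2.2.length = m.length := by
  induction tl with
  | nil => intro lt lf m; rfl
  | cons p tl ih =>
    intro lt lf m
    show (emLoop p.1 p.2 (emHelper lt p.1 lf m) tl).2.2.length = _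
    rw [ih, length_emHelper]

theorem length_emFinish (ft lt lf : Int) (m : List Int) (tl : List (Int × Int)) :
    (emFinish ft lt lf m tl).length = m.length := by
  unfold emFinish
  rw [length_emHelper, length_emLoop]

-- insertion-sort congruence: two comparators agreeing on the elements sort alike
theorem emInsertBy_congr {α : Type} (b1 b2 : α → α → Bool) (x : α) (ys : List α)
    (h : ∀ y ∈ ys, b1 x y = b2 x y) :
    PySem.List.insertBy b1 x ys = PySem.List.insertBy b2 x ys := by
  induction ys with
  | nil => rfl
  | cons y ys ih =>
    show (if b1 x y then _ else y :: PySem.List.insertBy b1 x ys)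
        = (if b2 x y then _ else y :: PySem.List.insertBy b2 x ys)
    rw [h y (by simp), ih (fun z hz => h z (by simp [hz]))]

theorem emFoldInsertBy_congr {α : Type} (b1 b2 : α → α → Bool) :
    ∀ (l acc : List α),
      (∀ a b : α, a ∈ l → (b ∈ acc ∨ b ∈ l) → b1 a b = b2 a b) →
      l.foldl (fun acc x => PySem.List.insertBy b1 x acc) acc
        = l.foldl (fun acc x => PySem.List.insertBy b2 x acc) acc := by
  intro l
  induction l with
  | nil => intro acc _; rfl
  | cons x l ih =>
    intro acc h
    rw [List.foldl_cons, List.foldl_cons]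
    rw [emInsertBy_congr b1 b2 x acc (fun y hy => h x y (by simp) (Or.inl hy))]
    apply ih
    intro a b ha hb
    apply h a b (by simp [ha])
    rcases hb with hb | hb
    · rcases (PySem.List.mem_insertBy _ _ _ _).mp hb with rfl | hb
      · exact Or.inr (by simp)
      · exact Or.inl hb
    · exact Or.inr (by simp [hb])

-- with pairwise-distinct first components, sorting pairs is sorting by the first component
theorem emSorted2_eq_sorted (l : List (Int × Int)) (hinj : ∀ a ∈ l, ∀ b ∈ l, a.1 = b.1 → a = b) :
    PySem.List.sorted2 l (fun p => p.1) (fun p => p.2)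
      = PySem.List.sorted l (fun p => p.1) := by
  simp only [PySem.List.sorted2, PySem.List.sorted]
  apply emFoldInsertBy_congr
  intro a b ha hb
  have hb' : b ∈ l := by tauto
  by_cases hab : a.1 = b.1
  · have : a = b := hinj a ha b hb' hab
    subst this
    simp
  · rcases lt_or_gt_of_ne hab with hlt | hgt
    · simp [hlt, asymm hlt]
    · simp [hgt, asymm hgt]

-- membership in the filtered dict's items forces the hour bound
theorem emFilter_keys (targets : List (Int × Int)) :
    (emFilter targets).keys
      = PySem.Set.ofList
          ((targets.filter (fun p => decide (0 ≤ p.1 ∧ p.1 < 24 ∧ 0 ≤ p.2 ∧ p.2 ≤ 60))).map (fun p => p.1)) := by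
  unfold emFilter
  rw [PySem.List.foldl_ite_eq_foldl_filter]
  rw [PySem.Dict.keys_foldl_insert_key]
  simp [PySem.Set.update_nil_left]

theorem emFilter_keys_nodup (targets : List (Int × Int)) :
    (emFilter targets).keys.Nodup := by
  rw [emFilter_keys]
  exact PySem.Set.nodup_ofList _

theorem emFilter_mem_bound (targets : List (Int × Int)) (p : Int × Int)
    (hp : p ∈ (emFilter targets).items) : 0 ≤ p.1 ∧ p.1 < 24 := by
  have hk : p.1 ∈ (emFilter targets).keys := PySem.Dict.mem_keys_of_mem_items (emFilter targets) hp
  rw [emFilter_keys] at hk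
  have := (PySem.Set.mem_ofList _ _).mp hk
  simp only [List.mem_map, List.mem_filter] at this
  obtain ⟨q, ⟨hqm, hq⟩, heq⟩ := this
  simp at hq
  omega

-- the match-and-fold of port A on a nonempty sorted list is emFinish
theorem emPortA (p0 : Int × Int) (tl : List (Int × Int)) :
    (match (p0 :: tl).foldl
      (fun (st : Option Int × Option Int × Option Int × List Int) p =>
        let ft := match st.1 with | none => some p.1 | some t => some t
        let m := match st.2.1, st.2.2.1 with
          | some lt', some lf' => emHelper lt' p.1 lf' st.2.2.2
          | _, _ => st.2.2.2
        (ft, some p.1, some p.2, m))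
      (none, none, none, List.replicate 24 0) with
    | (some ft, some lt', some lf', m) => emHelper lt' ft lf' m
    | (_, _, _, m) => m)
      = emFinish p0.1 p0.1 p0.2 (List.replicate 24 0) tl := by
  rw [List.foldl_cons]
  show (match tl.foldl
      (fun (st : Option Int × Option Int × Option Int × List Int) p =>
        let ft := match st.1 with | none => some p.1 | some t => some t
        let m := match st.2.1, st.2.2.1 with
          | some lt', some lf' => emHelper lt' p.1 lf' st.2.2.2
          | _, _ => st.2.2.2
        (ft, some p.1, some p.2, m))
      (some p0.1, some p0.1, some p0.2, List.replicate 24 0) with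
    | (some ft, some lt', some lf', m) => emHelper lt' ft lf' m
    | (_, _, _, m) => m)
      = emFinish p0.1 p0.1 p0.2 (List.replicate 24 0) tl
  rw [emFoldA]
  rfl

-- ===== VERDICT (by name: the statement is the Claim_ definition above) =====
theorem expand_markers_spec : Claim_equal_expand_markers := by
  intro targets _
  unfold Spec_expand_markers
  unfold expand_markers expand_markers_alt
  by_cases hemp : (emFilter targets).items = []
  · rw [if_pos hemp, if_pos hemp]
  · rw [if_neg hemp, if_neg hemp]
    have hkeys : (emFilter targets).keys = (emFilter targets).items.map (fun p => p.1) := rfl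
    have hnodup : ((emFilter targets).items.map (fun p => p.1)).Nodup := by
      rw [← hkeys]; exact emFilter_keys_nodup targets
    have hseq := emSorted2_eq_sorted (emFilter targets).items
      (fun a ha b hb hab => List.inj_on_of_nodup_map hnodup ha hb hab)
    have hperm := PySem.List.sorted2_perm (emFilter targets).items
      (fun p => p.1) (fun p => p.2) false
    obtain ⟨p0, tl, hits0⟩ : ∃ p0 tl,
        PySem.List.sorted2 (emFilter targets).items (fun p => p.1) (fun p => p.2) = p0 :: tl := by
      rcases hn : PySem.List.sorted2 (emFilter targets).items (fun p => p.1) (fun p => p.2) with _ | ⟨a, b⟩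
      · rw [hn] at hperm
        exact absurd hperm.symm.eq_nil hemp
      · exact ⟨a, b, rfl⟩
    have hpw : (p0 :: tl).Pairwise (fun a b => a.1 < b.1) := by
      have hle : (p0 :: tl).Pairwise (fun a b => a.1 ≤ b.1) := by
        rw [← hits0, hseq]; exact PySem.List.sorted_pairwise _ _
      have hmapnd : ((p0 :: tl).map (fun p => p.1)).Nodup := by
        refine ((List.Perm.map (fun p : Int × Int => p.1) ?_).nodup_iff).mpr hnodup
        rw [← hits0]; exact hperm
      have hne' : (p0 :: tl).Pairwise (fun a b => a.1 ≠ b.1) := List.pairwise_map.mp hmapnd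
      exact (hle.and hne').imp (fun h => lt_of_le_of_ne h.1 h.2)
    have hbound : ∀ p ∈ p0 :: tl, 0 ≤ p.1 ∧ p.1 < 24 := by
      intro p hp
      refine emFilter_mem_bound targets p ?_
      exact hperm.subset (hits0 ▸ hp)
    rw [hits0, emPortA p0 tl]
    have hb0 := hbound p0 (by simp)
    have hks : ∀ q ∈ tl, p0.1 < q.1 ∧ q.1 < 24 :=
      fun q hq => ⟨(List.pairwise_cons.mp hpw).1 q hq, (hbound q (by simp [hq])).2⟩
    apply List.ext_getElem
    · rw [length_emFinish]
      simp [PySem.List.length_pyRange_one]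
    · intro i h1 h2
      have hi24 : i < 24 := by
        rw [length_emFinish, List.length_replicate] at h1; exact h1
      rw [List.getElem_map, PySem.List.getElem_pyRange_one]
      simp only [zero_add]
      change _ = emLook (p0 :: tl) (i : Int) (((PySem.List.pyGet? (p0 :: tl) (-1)).getD (0, 0)).2)
      rw [emGetNegOne tl p0, emLook_cons]
      rw [← List.getD_eq_getElem (emFinish p0.1 p0.1 p0.2 (List.replicate 24 0) tl) 0 h1]
      have hfin := emFinish_getD tl p0.1 p0.1 p0.2 (List.replicate 24 0) (i : Int)
        (List.pairwise_cons.mp hpw).2 hks hb0.1 (le_refl _) hb0.2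
        (by simp) (by positivity) (by exact_mod_cast hi24)
      rw [Int.toNat_natCast] at hfin
      rw [hfin]
      by_cases hc : p0.1 ≤ (i : Int)
      · rw [if_pos hc, if_pos hc]
      · rw [if_neg hc, if_neg hc, if_pos (show (i : Int) < p0.1 by omega),
            emLook_gt tl _ _ (fun q hq => by have := (hks q hq).1; omega)]
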